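-- pv_equiv track=rewrite | github.com/ds-dga/hi-crawler | daily_proc.py | get_time_closet_to_18
-- ===== SOURCE A (Python) =====
-- def get_time_closet_to_18(hrs):
--     if len(hrs) == 0:
--         return None
--     HR = 18
--     if HR in hrs:
--         return HR
--     for i in range(1, 6):
--         if (HR + i) in hrs:
--             return HR + i
--         if (HR - i) in hrs:
--             return HR - i
--     return hrs[-1]
-- ===== SOURCE B (Python) =====
-- def get_time_closet_to_18(hrs):
--     if not hrs:
--         return None
--     candidates = [x for x in hrs if abs(x - 18) <= 5]
--     if candidates:
--         return min(candidates, key=lambda x: (abs(x - 18), x < 18))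
--     return hrs[-1]
-- ===== Notes on version B (the rewrite author's own statement) =====
-- stated objective: simpler
-- what changed: Replaces the priority-ordered outward membership scan (18, then 18+i/18-i for i=1..5) with a single filter of hours within 5 of 18 followed by one keyed min (distance, then prefer the higher hour), keeping the last-element fallback and None on empty.
import Mathlib
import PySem

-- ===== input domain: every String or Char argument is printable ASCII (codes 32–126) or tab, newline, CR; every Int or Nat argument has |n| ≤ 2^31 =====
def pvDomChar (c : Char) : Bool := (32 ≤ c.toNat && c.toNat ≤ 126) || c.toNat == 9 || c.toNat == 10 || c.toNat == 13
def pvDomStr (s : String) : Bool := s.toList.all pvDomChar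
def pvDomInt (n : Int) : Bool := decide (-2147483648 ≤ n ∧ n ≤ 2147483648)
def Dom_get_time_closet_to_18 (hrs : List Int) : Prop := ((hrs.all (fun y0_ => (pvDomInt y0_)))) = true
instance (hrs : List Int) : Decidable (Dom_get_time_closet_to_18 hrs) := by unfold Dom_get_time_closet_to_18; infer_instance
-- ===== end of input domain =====

-- B replaces A's priority-ordered outward membership scan with one filter plus a keyed min (simpler decomposition, same cost).

-- ===== PORT A =====
-- the 'for i in range(1, 6)' loop with its two early returns
def pvLoopA (hrs : List Int) (HR : Int) : List Int → Option Int
  | [] => none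
  | i :: rest =>
    if hrs.contains (HR + i) then some (HR + i)
    else if hrs.contains (HR - i) then some (HR - i)
    else pvLoopA hrs HR rest

def get_time_closet_to_18 (hrs : List Int) : Option Int :=
  if hrs.length = 0 then none
  else
    let HR : Int := 18
    if hrs.contains HR then some HR
    else
      match pvLoopA hrs HR (PySem.List.pyRange 1 6 1) with
      | some r => some r
      | none => PySem.List.pyGet? hrs (-1)

-- ===== PORT B =====
def get_time_closet_to_18_alt (hrs : List Int) : Option Int :=
  if hrs = [] then none
  else
    let candidates := hrs.filter (fun x => |x - 18| ≤ 5)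
    if candidates ≠ [] then
      PySem.List.min2? candidates (fun x => |x - 18|) (fun x => if x < 18 then (1 : Int) else 0)
    else
      PySem.List.pyGet? hrs (-1)

-- ===== PRECONDITION & SPEC =====
def Spec_get_time_closet_to_18 (hrs : List Int) (out : Option Int) : Prop := out = get_time_closet_to_18_alt hrs
instance (hrs : List Int) (out : Option Int) : Decidable (Spec_get_time_closet_to_18 hrs out) := by unfold Spec_get_time_closet_to_18; infer_instance

-- ===== CLAIM (what is proved, stated in full; the proofs are below) =====
def Claim_equal_get_time_closet_to_18 : Prop := ∀ (hrs : List Int), Dom_get_time_closet_to_18 hrs → Spec_get_time_closet_to_18 hrs (get_time_closet_to_18 hrs)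

-- ===== LEMMAS AND PROOFS =====

-- single Int encoding of B's lexicographic key (abs(x-18), x < 18)
def pvRank (x : Int) : Int := 2 * |x - 18| + (if x < 18 then 1 else 0)

def pvStep : Option Int → Int → Option Int
  | none, x => some x
  | some m, x => if pvRank x < pvRank m then some x else some m

def pvRmin (a x : Int) : Int := if pvRank x < pvRank a then x else a

theorem pvRank_inj (x y : Int) (h : pvRank x = pvRank y) : x = y := by
  unfold pvRank at h
  rcases abs_cases (x - 18) with ⟨h1, _⟩ | ⟨h1, _⟩ <;>
    rcases abs_cases (y - 18) with ⟨h2, _⟩ | ⟨h2, _⟩ <;>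
      rw [h1, h2] at h <;> split_ifs at h <;> omega

theorem pvCond_iff (x m : Int) :
    (|x - 18| < |m - 18| ∨ (¬ |m - 18| < |x - 18| ∧
      (if x < 18 then (1 : Int) else 0) < (if m < 18 then (1 : Int) else 0))) ↔
    pvRank x < pvRank m := by
  unfold pvRank
  rcases abs_cases (x - 18) with ⟨h1, _⟩ | ⟨h1, _⟩ <;>
    rcases abs_cases (m - 18) with ⟨h2, _⟩ | ⟨h2, _⟩ <;>
      rw [h1, h2] <;> split_ifs <;> omega

theorem pvMin2_fold (l : List Int) :
    PySem.List.min2? l (fun x => |x - 18|) (fun x => if x < 18 then (1 : Int) else 0)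
      = List.foldl pvStep none l := by
  unfold PySem.List.min2?
  apply List.foldl_ext
  intro acc x _
  cases acc with
  | none => rfl
  | some m =>
    have hc : (decide (|x - 18| < |m - 18|) ||
        !decide (|m - 18| < |x - 18|) &&
        decide ((if x < 18 then (1 : Int) else 0) < (if m < 18 then (1 : Int) else 0)))
        = decide (pvRank x < pvRank m) := by
      simp only [← decide_not, ← Bool.decide_and, ← Bool.decide_or]
      exact decide_eq_decide.mpr (pvCond_iff x m)
    show (if (decide (|x - 18| < |m - 18|) ||
        !decide (|m - 18| < |x - 18|) &&
        decide ((if x < 18 then (1 : Int) else 0) < (if m < 18 then (1 : Int) else 0))) = true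
      then some x else some m) = pvStep (some m) x
    rw [hc]
    simp only [pvStep]
    by_cases h : pvRank x < pvRank m <;> simp [h]

theorem pvFold_some (t : List Int) : ∀ m : Int,
    List.foldl pvStep (some m) t = some (t.foldl pvRmin m) := by
  induction t with
  | nil => intro m; rfl
  | cons x t ih =>
    intro m
    have hstep : pvStep (some m) x = some (pvRmin m x) := by
      simp only [pvStep, pvRmin]
      split_ifs <;> rfl
    simp only [List.foldl, hstep, ih]

theorem pvMin2_eq (h : Int) (t : List Int) :
    PySem.List.min2? (h :: t) (fun x => |x - 18|) (fun x => if x < 18 then (1 : Int) else 0)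
      = some (t.foldl pvRmin h) := by
  rw [pvMin2_fold]
  show List.foldl pvStep (pvStep none h) t = _
  rw [show pvStep none h = some h from rfl]
  exact pvFold_some t h

theorem pvFoldl_rmin_mem (t : List Int) : ∀ m : Int, t.foldl pvRmin m = m ∨ t.foldl pvRmin m ∈ t := by
  induction t with
  | nil => intro m; left; rfl
  | cons x t ih =>
    intro m
    simp only [List.foldl, pvRmin]
    by_cases h : pvRank x < pvRank m
    · simp only [h, if_true]
      rcases ih x with h1 | h1
      · right; rw [h1]; exact List.mem_cons_self
      · right; exact List.mem_cons_of_mem _ h1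
    · simp only [h, if_false]
      rcases ih m with h1 | h1
      · left; exact h1
      · right; exact List.mem_cons_of_mem _ h1

theorem pvFoldl_rmin_min (t : List Int) : ∀ m : Int,
    pvRank (t.foldl pvRmin m) ≤ pvRank m ∧ ∀ y ∈ t, pvRank (t.foldl pvRmin m) ≤ pvRank y := by
  induction t with
  | nil => intro m; exact ⟨le_refl _, by simp⟩
  | cons x t ih =>
    intro m
    simp only [List.foldl, pvRmin]
    by_cases h : pvRank x < pvRank m
    · simp only [h, if_true]
      refine ⟨le_trans (ih x).1 (le_of_lt h), ?_⟩
      intro y hy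
      rcases List.mem_cons.mp hy with rfl | hy
      · exact (ih y).1
      · exact (ih x).2 y hy
    · simp only [h, if_false]
      refine ⟨(ih m).1, ?_⟩
      intro y hy
      rcases List.mem_cons.mp hy with rfl | hy
      · exact le_trans (ih m).1 (not_lt.mp h)
      · exact (ih m).2 y hy

-- B returns some v whenever v is the candidate of minimal rank
theorem pvBval (hrs : List Int) (v : Int) (hv : v ∈ hrs) (hc : |v - 18| ≤ 5)
    (hmin : ∀ y ∈ hrs, |y - 18| ≤ 5 → pvRank v ≤ pvRank y) :
    get_time_closet_to_18_alt hrs = some v := by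
  have hne : hrs ≠ [] := by intro h; rw [h] at hv; exact absurd hv (List.not_mem_nil)
  have hvc : v ∈ hrs.filter (fun x => decide (|x - 18| ≤ 5)) :=
    List.mem_filter.mpr ⟨hv, by simpa using hc⟩
  unfold get_time_closet_to_18_alt
  rw [if_neg hne]
  have hcne : hrs.filter (fun x => decide (|x - 18| ≤ 5)) ≠ [] := by
    intro h; rw [h] at hvc; exact absurd hvc (List.not_mem_nil)
  simp only [hcne, if_true, ne_eq, not_false_iff]
  obtain ⟨h, t, hht⟩ : ∃ h t, hrs.filter (fun x => decide (|x - 18| ≤ 5)) = h :: t := by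
    cases hh : hrs.filter (fun x => decide (|x - 18| ≤ 5)) with
    | nil => exact absurd hh hcne
    | cons a b => exact ⟨a, b, rfl⟩
  rw [hht, pvMin2_eq]
  set r := t.foldl pvRmin h with hr
  have hrmem : r ∈ hrs.filter (fun x => decide (|x - 18| ≤ 5)) := by
    rw [hht]
    rcases pvFoldl_rmin_mem t h with h1 | h1
    · rw [hr, h1]; exact List.mem_cons_self
    · exact List.mem_cons_of_mem _ h1
  have hrle : ∀ y ∈ hrs.filter (fun x => decide (|x - 18| ≤ 5)), pvRank r ≤ pvRank y := by
    intro y hy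
    rw [hht] at hy
    rcases List.mem_cons.mp hy with rfl | hy
    · exact (pvFoldl_rmin_min t y).1
    · exact (pvFoldl_rmin_min t h).2 y hy
  have h1 : pvRank r ≤ pvRank v := hrle v hvc
  obtain ⟨hrh, hrc⟩ := List.mem_filter.mp hrmem
  have h2 : pvRank v ≤ pvRank r := hmin r hrh (by simpa using hrc)
  have : r = v := pvRank_inj r v (le_antisymm h1 h2)
  rw [this]

theorem pvCand_cases (y : Int) (hc : |y - 18| ≤ 5) :
    y = 18 ∨ y = 19 ∨ y = 17 ∨ y = 20 ∨ y = 16 ∨ y = 21 ∨ y = 15 ∨ y = 22 ∨ y = 14 ∨ y = 23 ∨ y = 13 := by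
  rcases abs_cases (y - 18) with ⟨h1, _⟩ | ⟨h1, _⟩ <;> rw [h1] at hc <;> omega

-- ===== VERDICT (by name: the statement is the Claim_ definition above) =====
theorem get_time_closet_to_18_spec : Claim_equal_get_time_closet_to_18 := by
  intro hrs _
  unfold Spec_get_time_closet_to_18 get_time_closet_to_18
  by_cases hE : hrs.length = 0
  · have hnil : hrs = [] := List.eq_nil_of_length_eq_zero hE
    subst hnil
    rfl
  · rw [if_neg hE]
    have hne : hrs ≠ [] := by intro h; exact hE (by simp [h])
    have hR : PySem.List.pyRange 1 6 1 = [1, 2, 3, 4, 5] := by decide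
    rw [hR]
    simp only [pvLoopA]
    by_cases c18 : hrs.contains (18) = true
    · rw [if_pos c18]
      refine (pvBval hrs (18) (by simpa using c18) (by decide) ?_).symm
      intro y hy hyc
      rcases pvCand_cases y hyc with rfl|rfl|rfl|rfl|rfl|rfl|rfl|rfl|rfl|rfl|rfl <;>
        (decide)
    · rw [if_neg c18]
      have hn18 : (18 : Int) ∉ hrs := by simpa using c18
      by_cases c19 : hrs.contains (18 + 1) = true
      · rw [if_pos c19]
        refine (pvBval hrs (18 + 1) (by simpa using c19) (by decide) ?_).symm
        intro y hy hyc
        rcases pvCand_cases y hyc with rfl|rfl|rfl|rfl|rfl|rfl|rfl|rfl|rfl|rfl|rfl <;>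
          (first | decide | exact absurd hy hn18)
      · rw [if_neg c19]
        have hn19 : (19 : Int) ∉ hrs := by simpa using c19
        by_cases c17 : hrs.contains (18 - 1) = true
        · rw [if_pos c17]
          refine (pvBval hrs (18 - 1) (by simpa using c17) (by decide) ?_).symm
          intro y hy hyc
          rcases pvCand_cases y hyc with rfl|rfl|rfl|rfl|rfl|rfl|rfl|rfl|rfl|rfl|rfl <;>
            (first | decide | exact absurd hy hn18 | exact absurd hy hn19)
        · rw [if_neg c17]
          have hn17 : (17 : Int) ∉ hrs := by simpa using c17
          by_cases c20 : hrs.contains (18 + 2) = true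
          · rw [if_pos c20]
            refine (pvBval hrs (18 + 2) (by simpa using c20) (by decide) ?_).symm
            intro y hy hyc
            rcases pvCand_cases y hyc with rfl|rfl|rfl|rfl|rfl|rfl|rfl|rfl|rfl|rfl|rfl <;>
              (first | decide | exact absurd hy hn18 | exact absurd hy hn19 | exact absurd hy hn17)
          · rw [if_neg c20]
            have hn20 : (20 : Int) ∉ hrs := by simpa using c20
            by_cases c16 : hrs.contains (18 - 2) = true
            · rw [if_pos c16]
              refine (pvBval hrs (18 - 2) (by simpa using c16) (by decide) ?_).symm
              intro y hy hyc
              rcases pvCand_cases y hyc with rfl|rfl|rfl|rfl|rfl|rfl|rfl|rfl|rfl|rfl|rfl <;>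
                (first | decide | exact absurd hy hn18 | exact absurd hy hn19 | exact absurd hy hn17 | exact absurd hy hn20)
            · rw [if_neg c16]
              have hn16 : (16 : Int) ∉ hrs := by simpa using c16
              by_cases c21 : hrs.contains (18 + 3) = true
              · rw [if_pos c21]
                refine (pvBval hrs (18 + 3) (by simpa using c21) (by decide) ?_).symm
                intro y hy hyc
                rcases pvCand_cases y hyc with rfl|rfl|rfl|rfl|rfl|rfl|rfl|rfl|rfl|rfl|rfl <;>
                  (first | decide | exact absurd hy hn18 | exact absurd hy hn19 | exact absurd hy hn17 | exact absurd hy hn20 | exact absurd hy hn16)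
              · rw [if_neg c21]
                have hn21 : (21 : Int) ∉ hrs := by simpa using c21
                by_cases c15 : hrs.contains (18 - 3) = true
                · rw [if_pos c15]
                  refine (pvBval hrs (18 - 3) (by simpa using c15) (by decide) ?_).symm
                  intro y hy hyc
                  rcases pvCand_cases y hyc with rfl|rfl|rfl|rfl|rfl|rfl|rfl|rfl|rfl|rfl|rfl <;>
                    (first | decide | exact absurd hy hn18 | exact absurd hy hn19 | exact absurd hy hn17 | exact absurd hy hn20 | exact absurd hy hn16 | exact absurd hy hn21)
                · rw [if_neg c15]
                  have hn15 : (15 : Int) ∉ hrs := by simpa using c15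
                  by_cases c22 : hrs.contains (18 + 4) = true
                  · rw [if_pos c22]
                    refine (pvBval hrs (18 + 4) (by simpa using c22) (by decide) ?_).symm
                    intro y hy hyc
                    rcases pvCand_cases y hyc with rfl|rfl|rfl|rfl|rfl|rfl|rfl|rfl|rfl|rfl|rfl <;>
                      (first | decide | exact absurd hy hn18 | exact absurd hy hn19 | exact absurd hy hn17 | exact absurd hy hn20 | exact absurd hy hn16 | exact absurd hy hn21 | exact absurd hy hn15)
                  · rw [if_neg c22]
                    have hn22 : (22 : Int) ∉ hrs := by simpa using c22
                    by_cases c14 : hrs.contains (18 - 4) = true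
                    · rw [if_pos c14]
                      refine (pvBval hrs (18 - 4) (by simpa using c14) (by decide) ?_).symm
                      intro y hy hyc
                      rcases pvCand_cases y hyc with rfl|rfl|rfl|rfl|rfl|rfl|rfl|rfl|rfl|rfl|rfl <;>
                        (first | decide | exact absurd hy hn18 | exact absurd hy hn19 | exact absurd hy hn17 | exact absurd hy hn20 | exact absurd hy hn16 | exact absurd hy hn21 | exact absurd hy hn15 | exact absurd hy hn22)
                    · rw [if_neg c14]
                      have hn14 : (14 : Int) ∉ hrs := by simpa using c14
                      by_cases c23 : hrs.contains (18 + 5) = true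
                      · rw [if_pos c23]
                        refine (pvBval hrs (18 + 5) (by simpa using c23) (by decide) ?_).symm
                        intro y hy hyc
                        rcases pvCand_cases y hyc with rfl|rfl|rfl|rfl|rfl|rfl|rfl|rfl|rfl|rfl|rfl <;>
                          (first | decide | exact absurd hy hn18 | exact absurd hy hn19 | exact absurd hy hn17 | exact absurd hy hn20 | exact absurd hy hn16 | exact absurd hy hn21 | exact absurd hy hn15 | exact absurd hy hn22 | exact absurd hy hn14)
                      · rw [if_neg c23]
                        have hn23 : (23 : Int) ∉ hrs := by simpa using c23
                        by_cases c13 : hrs.contains (18 - 5) = true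
                        · rw [if_pos c13]
                          refine (pvBval hrs (18 - 5) (by simpa using c13) (by decide) ?_).symm
                          intro y hy hyc
                          rcases pvCand_cases y hyc with rfl|rfl|rfl|rfl|rfl|rfl|rfl|rfl|rfl|rfl|rfl <;>
                            (first | decide | exact absurd hy hn18 | exact absurd hy hn19 | exact absurd hy hn17 | exact absurd hy hn20 | exact absurd hy hn16 | exact absurd hy hn21 | exact absurd hy hn15 | exact absurd hy hn22 | exact absurd hy hn14 | exact absurd hy hn23)
                        · rw [if_neg c13]
                          have hn13 : (13 : Int) ∉ hrs := by simpa using c13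
                          have hfil : hrs.filter (fun x => decide (|x - 18| ≤ 5)) = [] := by
                            refine List.filter_eq_nil_iff.mpr ?_
                            intro y hy hdec
                            have hyc : |y - 18| ≤ 5 := by simpa using hdec
                            rcases pvCand_cases y hyc with rfl|rfl|rfl|rfl|rfl|rfl|rfl|rfl|rfl|rfl|rfl <;>
                              (first | exact absurd hy hn18 | exact absurd hy hn19 | exact absurd hy hn17 | exact absurd hy hn20 | exact absurd hy hn16 | exact absurd hy hn21 | exact absurd hy hn15 | exact absurd hy hn22 | exact absurd hy hn14 | exact absurd hy hn23 | exact absurd hy hn13)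
                          unfold get_time_closet_to_18_alt
                          rw [if_neg hne, hfil]
                          simp
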